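-- pv_equiv track=rewrite | github.com/fantauzzi/bioalg | chapter01/main.py | argsmax
-- ===== SOURCE A (Python) =====
-- def argsmax(list_like):
--     max_so_far = float('-inf')
--     indices = []  # Unnecessary, here just for clarity
--     for i, item in enumerate(list_like):
--         if item == max_so_far:
--             indices.append(i)
--         elif item > max_so_far:
--             max_so_far = item
--             indices = [i]
--     return indices
-- ===== SOURCE B (Python) =====
-- def argsmax(list_like):
--     if not list_like:
--         return []
--     m = max(list_like)
--     return [i for i, x in enumerate(list_like) if x == m]
-- ===== Notes on version B (the rewrite author's own statement) =====
-- stated objective: simpler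
-- what changed: Replaces A's single-pass running-max with tie-list resets by a compute-max-then-filter two-pass decomposition (max(), then a comprehension of the matching indices).
import Mathlib
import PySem

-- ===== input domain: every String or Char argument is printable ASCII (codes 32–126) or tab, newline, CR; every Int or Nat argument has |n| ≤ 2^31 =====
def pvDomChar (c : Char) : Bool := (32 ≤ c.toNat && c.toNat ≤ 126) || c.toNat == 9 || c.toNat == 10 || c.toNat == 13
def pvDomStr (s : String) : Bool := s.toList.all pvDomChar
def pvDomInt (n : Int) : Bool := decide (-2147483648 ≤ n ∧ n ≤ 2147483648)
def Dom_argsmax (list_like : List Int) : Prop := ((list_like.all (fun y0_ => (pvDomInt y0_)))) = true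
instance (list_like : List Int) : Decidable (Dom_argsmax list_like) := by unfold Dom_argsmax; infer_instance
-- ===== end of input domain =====

-- B replaces A's running-max with tie-list resets by compute-max-then-filter: simpler, same cost.

-- ===== PORT A =====
-- state: max_so_far (none = float('-inf'), never equal to and always below any int), indices
def argsmaxLoop : List (Int × Int) → Option Int → List Int → List Int
  | [], _, indices => indices
  | (i, item) :: rest, maxSoFar, indices =>
    match maxSoFar with
    | some m =>
      if item = m then argsmaxLoop rest (some m) (indices ++ [i])
      else if item > m then argsmaxLoop rest (some item) [i]
      else argsmaxLoop rest (some m) indices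
    | none => argsmaxLoop rest (some item) [i]   -- item == -inf is false, item > -inf is true

def argsmax (list_like : List Int) : List Int :=
  argsmaxLoop (PySem.List.enumerate list_like 0) none []

-- ===== PORT B =====
def argsmax_alt (list_like : List Int) : List Int :=
  if list_like = [] then []
  else
    match PySem.List.max? list_like (fun y => y) with
    | some m => ((PySem.List.enumerate list_like 0).filter (fun p => p.2 == m)).map (·.1)
    | none => []

-- ===== PRECONDITION & SPEC =====
def Spec_argsmax (list_like : List Int) (out : List Int) : Prop := out = argsmax_alt list_like
instance (list_like : List Int) (out : List Int) : Decidable (Spec_argsmax list_like out) := by unfold Spec_argsmax; infer_instance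

-- ===== CLAIM (what is proved, stated in full; the proofs are below) =====
def Claim_equal_argsmax : Prop := ∀ (list_like : List Int), Dom_argsmax list_like → Spec_argsmax list_like (argsmax list_like)

-- ===== LEMMAS AND PROOFS =====
theorem argsmaxLoop_some (xs : List Int) : ∀ (s m : Int) (idxs : List Int),
    argsmaxLoop (PySem.List.enumerate xs s) (some m) idxs =
      (if xs.foldl max m = m then idxs else []) ++
        ((PySem.List.enumerate xs s).filter (fun p => p.2 == xs.foldl max m)).map (·.1) := by
  induction xs with
  | nil => intro s m idxs; simp [PySem.List.enumerate_nil, argsmaxLoop]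
  | cons x xs ih =>
    intro s m idxs
    have hle : ∀ (a : Int), a ≤ xs.foldl max a := fun a => (PySem.List.le_foldl_max xs a).1
    simp only [PySem.List.enumerate_cons, argsmaxLoop, List.foldl_cons]
    by_cases hxm : x = m
    · subst hxm
      simp only [max_self]
      rw [ih]
      by_cases hF : xs.foldl max x = x
      · simp [hF]
      · have hne : (x == xs.foldl max x) = false := by
          have := hle x; simp; omega
        simp [hF, hne]
    · rw [if_neg hxm]
      by_cases hgt : x > m
      · rw [if_pos hgt]
        have hmax : max m x = x := max_eq_right hgt.le
        simp only [hmax]; rw [ih]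
        have hne : xs.foldl max x ≠ m := by
          have := hle x; omega
        rw [if_neg hne]
        by_cases hF : xs.foldl max x = x
        · simp [hF]
        · have : ¬ (x == xs.foldl max x) = true := by
            simp; omega
          simp [hF, this]
      · rw [if_neg hgt]
        have hlt : x < m := lt_of_le_of_ne (not_lt.mp hgt) hxm
        have hmax : max m x = m := max_eq_left hlt.le
        simp only [hmax]; rw [ih]
        have : ¬ (x == xs.foldl max m) = true := by
          have := hle m; simp; omega
        simp [this]

theorem argsmax_spec : Claim_equal_argsmax := by
  intro list_like _
  unfold Spec_argsmax argsmax argsmax_alt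
  cases list_like with
  | nil => simp [PySem.List.enumerate_nil, argsmaxLoop]
  | cons x xs =>
    simp only [PySem.List.enumerate_cons, argsmaxLoop, PySem.List.max?_id_cons,
      reduceCtorEq, if_false]
    rw [argsmaxLoop_some]
    by_cases hF : xs.foldl max x = x
    · simp [hF]
    · have : ¬ (x == xs.foldl max x) = true := by simp; omega
      simp [hF, this]
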